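-- pv_equiv track=rewrite | github.com/krnets/codewars-practice | 6kyu/Madhav array/kata.py | is_madhav_array
-- ===== SOURCE A (Python) =====
-- def is_madhav_array(arr):
--     if len(arr) <= 2:
--         return False
--
--     first_num = arr[0]
--     i = 1
--     window_size = 2
--
--     while i + window_size <= len(arr):
--         current_sum = sum(arr[i : i + window_size])
--         if current_sum != first_num:
--             return False
--         i += window_size
--         window_size += 1
--
--     return i == len(arr)
-- ===== SOURCE B (Python) =====
-- def is_madhav_array(arr):
--     n = len(arr)
--     if n <= 2:
--         return False
--     target = arr[0]
--     total = 0       # running prefix sum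
--     blocks = 0      # completed blocks (sizes 1, 2, 3, ...)
--     boundary = 0    # prefix length at which the last completed block ended
--     for i, x in enumerate(arr):
--         total += x
--         if i + 1 == boundary + blocks + 1:   # end of block `blocks + 1`
--             blocks += 1
--             boundary = i + 1
--             if total != blocks * target:     # prefix sum must be blocks * arr[0]
--                 return False
--     return boundary == n
-- ===== Notes on version B (the rewrite author's own statement) =====
-- stated objective: alternative
-- what changed: A slices out each growing window and sums it in a while loop; B makes a single enumerate pass maintaining a running prefix sum and, at each triangular block boundary, checks the cumulative total equals blocks*arr[0], finally requiring the last boundary to land exactly on len(arr).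
import Mathlib
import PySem

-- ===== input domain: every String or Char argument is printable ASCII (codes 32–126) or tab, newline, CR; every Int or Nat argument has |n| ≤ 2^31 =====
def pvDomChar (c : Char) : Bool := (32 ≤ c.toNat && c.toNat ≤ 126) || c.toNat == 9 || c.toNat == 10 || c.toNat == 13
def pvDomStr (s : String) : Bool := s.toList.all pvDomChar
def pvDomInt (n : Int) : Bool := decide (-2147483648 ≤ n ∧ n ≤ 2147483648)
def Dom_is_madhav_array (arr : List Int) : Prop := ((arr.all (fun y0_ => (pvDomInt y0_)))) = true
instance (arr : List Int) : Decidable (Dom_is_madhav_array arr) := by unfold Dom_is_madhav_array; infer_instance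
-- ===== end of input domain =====

-- B replaces A's block-slicing while loop (sum each growing window, early return) by a single
-- running-prefix-sum pass that tests the cumulative total against blocks*arr[0] at each block
-- boundary; same O(n) cost (objective: alternative).

-- ===== PORT A =====
-- A's while loop: i advances by the window size, the window grows by 1 each step.
-- (i and window_size are nonnegative throughout in Python, so Nat mirrors Python's int.)
def madhavLoop (arr : List Int) (first_num : Int) (i window_size : Nat) : Bool :=
  if _h : i + window_size ≤ arr.length then
    if (PySem.List.slice arr (some (i : Int)) (some ((i : Int) + (window_size : Int)))).sum ≠ first_num
    then false
    else madhavLoop arr first_num (i + window_size) (window_size + 1)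
  else i == arr.length
termination_by arr.length + 2 - (i + window_size)
decreasing_by omega

def is_madhav_array (arr : List Int) : Bool :=
  if arr.length ≤ 2 then false
  else madhavLoop arr arr.headI 1 2    -- arr[0]: safe, the guard above ensures arr ≠ []

-- ===== PORT B =====
-- B's for-loop over enumerate(arr): structural recursion on the remaining list, carrying the
-- index i and the state (total, blocks, boundary); the final `boundary == n` follows the loop.
def altLoop (n : Nat) (target : Int) (l : List Int) (i : Nat) (total : Int)
    (blocks boundary : Nat) : Bool :=
  match l with
  | [] => boundary == n
  | x :: rest =>
    let t := total + x
    if i + 1 = boundary + blocks + 1 then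
      if t ≠ ((blocks : Int) + 1) * target then false
      else altLoop n target rest (i + 1) t (blocks + 1) (i + 1)
    else altLoop n target rest (i + 1) t blocks boundary

def is_madhav_array_alt (arr : List Int) : Bool :=
  if arr.length ≤ 2 then false
  else altLoop arr.length arr.headI arr 0 0 0 0    -- arr[0]: safe, arr ≠ [] by the guard

-- ===== PRECONDITION & SPEC =====
def Spec_is_madhav_array (arr : List Int) (out : Bool) : Prop := out = is_madhav_array_alt arr
instance (arr : List Int) (out : Bool) : Decidable (Spec_is_madhav_array arr out) := by unfold Spec_is_madhav_array; infer_instance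

-- ===== CLAIM (what is proved, stated in full; the proofs are below) =====
def Claim_equal_is_madhav_array : Prop := ∀ (arr : List Int), Dom_is_madhav_array arr → Spec_is_madhav_array arr (is_madhav_array arr)

-- ===== LEMMAS AND PROOFS =====

def tri (k : Nat) : Nat := k * (k + 1) / 2

theorem tri_succ (k : Nat) : tri (k + 1) = tri k + (k + 1) := by
  unfold tri
  have h : (k + 1) * (k + 1 + 1) = k * (k + 1) + (k + 1) * 2 := by ring
  rw [h, Nat.add_mul_div_right _ _ (by omega : 0 < 2)]

-- the check for block j (which spans [tri j, tri (j+1)), of length j+1)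
def chkF (arr : List Int) (first : Int) (j : Nat) : Bool :=
  ((arr.drop (tri j)).take (j + 1)).sum == first

-- block-wise shape of A's loop
def chk (arr : List Int) (first : Int) (m : Nat) : Bool :=
  if tri (m + 1) ≤ arr.length then chkF arr first m && chk arr first (m + 1)
  else tri m == arr.length
termination_by arr.length + 1 - tri m
decreasing_by have := tri_succ m; omega

-- block-wise shape of B's loop: running total, mid-block at position p of block b+1
def bchk (arr : List Int) (target : Int) (b p : Nat) (total : Int) : Bool :=
  if tri (b + 1) ≤ arr.length then
    if total + ((arr.drop p).take (tri (b + 1) - p)).sum ≠ ((b : Int) + 1) * target then false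
    else bchk arr target (b + 1) (tri (b + 1)) (total + ((arr.drop p).take (tri (b + 1) - p)).sum)
  else tri b == arr.length
termination_by arr.length + 1 - tri b
decreasing_by have := tri_succ b; omega

theorem lemA (arr : List Int) (first : Int) :
    ∀ fuel m, arr.length + 1 - tri m ≤ fuel →
      madhavLoop arr first (tri m) (m + 1) = chk arr first m := by
  intro fuel
  induction fuel with
  | zero =>
    intro m hm
    rw [madhavLoop, chk]
    have hts := tri_succ m
    have h1 : ¬ (tri m + (m + 1) ≤ arr.length) := by omega
    have h2 : ¬ (tri (m + 1) ≤ arr.length) := by omega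
    simp [h1, h2]
  | succ f ih =>
    intro m hm
    rw [madhavLoop, chk]
    have hts := tri_succ m
    by_cases h : tri (m + 1) ≤ arr.length
    · have h1 : tri m + (m + 1) ≤ arr.length := by omega
      rw [dif_pos h1, if_pos h]
      rw [PySem.List.slice_natCast_add]
      have hrec : madhavLoop arr first (tri m + (m + 1)) (m + 1 + 1) = chk arr first (m + 1) := by
        have : tri m + (m + 1) = tri (m + 1) := by omega
        rw [this]
        exact ih (m + 1) (by omega)
      rw [hrec]
      by_cases hs : ((arr.drop (tri m)).take (m + 1)).sum = first
      · simp [hs, chkF]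
      · simp [hs, chkF]
    · have h1 : ¬ (tri m + (m + 1) ≤ arr.length) := by omega
      rw [dif_neg h1, if_neg h]

-- one element of the list: splitting the first entry off a take of a drop
theorem drop_take_cons (arr : List Int) (p k : Nat) (hp : p < arr.length) :
    ((arr.drop p).take (k + 1)).sum = arr.getD p 0 + ((arr.drop (p + 1)).take k).sum := by
  have h : arr.drop p = arr.getD p 0 :: arr.drop (p + 1) := by
    rw [List.getD_eq_getElem _ _ hp]
    exact List.drop_eq_getElem_cons hp
  rw [h, List.take_succ_cons, List.sum_cons]

-- B's element-wise loop equals the block-wise shape bchk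
theorem lemB1 (arr : List Int) (target : Int) :
    ∀ fuel p b total, arr.length - p ≤ fuel → tri b ≤ p → p < tri (b + 1) →
      altLoop arr.length target (arr.drop p) p total b (tri b) = bchk arr target b p total := by
  intro fuel
  induction fuel with
  | zero =>
    intro p b total hf hb hp
    have hpn : arr.length ≤ p := by omega
    rw [List.drop_eq_nil_of_le hpn, altLoop, bchk]
    have h2 : ¬ (tri (b + 1) ≤ arr.length) := by omega
    rw [if_neg h2]
  | succ f ih =>
    intro p b total hf hb hp
    by_cases hpn : p < arr.length
    · have hsplit : arr.drop p = arr.getD p 0 :: arr.drop (p + 1) := by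
        rw [List.getD_eq_getElem _ _ hpn]
        exact List.drop_eq_getElem_cons hpn
      rw [hsplit]
      rw [altLoop]
      have hts := tri_succ b
      by_cases htrig : p + 1 = tri b + b + 1
      · -- end of block b+1: the boundary test fires
        have htrig' : p + 1 = tri (b + 1) := by omega
        rw [if_pos (by omega : p + 1 = tri b + b + 1)]
        rw [bchk]
        have hle : tri (b + 1) ≤ arr.length := by omega
        rw [if_pos hle]
        have hsum : ((arr.drop p).take (tri (b + 1) - p)).sum = arr.getD p 0 := by
          have : tri (b + 1) - p = 1 := by omega
          rw [this, hsplit]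
          simp
        rw [hsum]
        by_cases hchk : total + arr.getD p 0 ≠ ((b : Int) + 1) * target
        · rw [if_pos hchk, if_pos hchk]
        · rw [if_neg hchk, if_neg hchk]
          have := ih (p + 1) (b + 1) (total + arr.getD p 0) (by omega)
            (by omega) (by have := tri_succ (b + 1); omega)
          rw [htrig'] at this ⊢
          exact this
      · -- mid-block: just accumulate
        rw [if_neg (by omega : ¬ (p + 1 = tri b + b + 1))]
        have hrec := ih (p + 1) b (total + arr.getD p 0) (by omega) (by omega) (by omega)
        rw [hrec]
        -- bchk absorbs one element of the current block
        have hk : tri (b + 1) - p = (tri (b + 1) - (p + 1)) + 1 := by omega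
        have hsum : ((arr.drop p).take (tri (b + 1) - p)).sum
            = arr.getD p 0 + ((arr.drop (p + 1)).take (tri (b + 1) - (p + 1))).sum := by
          rw [hk]; exact drop_take_cons arr p _ hpn
        conv_lhs => rw [bchk]
        conv_rhs => rw [bchk]
        rw [hsum, ← add_assoc]
    · have hpn' : arr.length ≤ p := by omega
      rw [List.drop_eq_nil_of_le hpn', altLoop, bchk]
      have h2 : ¬ (tri (b + 1) ≤ arr.length) := by omega
      rw [if_neg h2]

-- with the running total equal to b * target, bchk at a boundary is A's block-wise check
theorem lemB2 (arr : List Int) (target : Int) :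
    ∀ fuel b, arr.length + 1 - tri b ≤ fuel →
      bchk arr target b (tri b) ((b : Int) * target) = chk arr target b := by
  intro fuel
  induction fuel with
  | zero =>
    intro b hf
    rw [bchk, chk]
    have := tri_succ b
    have h2 : ¬ (tri (b + 1) ≤ arr.length) := by omega
    rw [if_neg h2, if_neg h2]
  | succ f ih =>
    intro b hf
    rw [bchk, chk]
    have hts := tri_succ b
    by_cases hle : tri (b + 1) ≤ arr.length
    · rw [if_pos hle, if_pos hle]
      have hlen : tri (b + 1) - tri b = b + 1 := by omega
      rw [hlen]
      set s := ((arr.drop (tri b)).take (b + 1)).sum with hs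
      have hiff : ((b : Int) * target + s ≠ ((b : Int) + 1) * target) ↔ (s ≠ target) := by
        constructor <;> intro h hc <;> apply h <;> [skip; skip] <;> nlinarith [hc]
      by_cases hst : s = target
      · rw [if_neg (by rw [hiff]; exact fun h => h hst)]
        have htot : (b : Int) * target + s = ((b : Int) + 1) * target := by rw [hst]; ring
        rw [htot]
        have : ((b : Int) + 1) = (((b + 1 : Nat)) : Int) := by push_cast; ring
        rw [this]
        rw [ih (b + 1) (by omega)]
        have : chkF arr target b = true := by simp [chkF, ← hs, hst]
        rw [this, Bool.true_and]
      · rw [if_pos (by rw [hiff]; exact hst)]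
        have : chkF arr target b = false := by simp [chkF, ← hs]; exact hst
        rw [this, Bool.false_and]
    · rw [if_neg hle, if_neg hle]

-- ===== VERDICT (by name: the statement is the Claim_ definition above) =====
theorem is_madhav_array_spec : Claim_equal_is_madhav_array := by
  intro arr _
  unfold Spec_is_madhav_array
  rw [is_madhav_array, is_madhav_array_alt]
  by_cases hle : arr.length ≤ 2
  · rw [if_pos hle, if_pos hle]
  · rw [if_neg hle, if_neg hle]
    have hA : madhavLoop arr arr.headI 1 2 = chk arr arr.headI 1 := by
      have := lemA arr arr.headI (arr.length + 1) 1 (by unfold tri; omega)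
      simpa [tri] using this
    have hB : altLoop arr.length arr.headI arr 0 0 0 0 = bchk arr arr.headI 0 0 0 := by
      have := lemB1 arr arr.headI arr.length 0 0 0 (by omega) (by unfold tri; omega)
        (by unfold tri; omega)
      simpa [tri] using this
    have hB2 : bchk arr arr.headI 0 0 0 = chk arr arr.headI 0 := by
      have := lemB2 arr arr.headI (arr.length + 2) 0 (by unfold tri; omega)
      simpa [tri] using this
    rw [hA, hB, hB2]
    conv_rhs => rw [chk]
    have h1 : tri (0 + 1) ≤ arr.length := by unfold tri; omega
    rw [if_pos h1]
    have hc0 : chkF arr arr.headI 0 = true := by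
      unfold chkF tri
      cases arr with
      | nil => simp at hle
      | cons a l => simp
    rw [hc0, Bool.true_and]
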